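-- pv_equiv track=rewrite | github.com/LennyGonz/LeetCode-Questions | Daily-Coding-Problem/problem-239.py | num_paths
-- ===== SOURCE A (Python) =====
-- def num_paths(current, jumps, visited, n):
--   if n - 1 == 0:
--     return 1
--
--   paths = 0
--   for next_number in range(1, 10):
--     if next_number not in visited:
--       if (current, next_number) not in jumps or jumps[(current, next_number)] in visited:
--         visited.add(next_number)
--         paths += num_paths(next_number, jumps, visited, n - 1)
--         visited.remove(next_number)
--
--   return paths
-- ===== SOURCE B (Python) =====
-- def num_paths(current, jumps, visited, n):
--     # Bitmask dynamic programming: one forward layer per step, each layer a dict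
--     # mapping (last digit, bitmask of digits used along the path) to path counts.
--     if n <= 0:
--         return 0
--     layer = {(current, 0): 1}
--     for _ in range(n - 1):
--         if not layer:
--             break
--         nxt = {}
--         for (cur, mask), c in layer.items():
--             for d in range(1, 10):
--                 if d in visited or (mask >> d) & 1:
--                     continue
--                 t = jumps.get((cur, d))
--                 if t is None or t in visited or (1 <= t <= 9 and (mask >> t) & 1):
--                     key = (d, mask | (1 << d))
--                     nxt[key] = nxt.get(key, 0) + c
--         layer = nxt
--     return sum(layer.values())
-- ===== Notes on version B (the rewrite author's own statement) =====
-- stated objective: faster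
-- what changed: Replaces A's recursive backtracking that enumerates every individual keypad path (mutating the shared visited set) by an iterative bitmask dynamic programming: a layer dict from (last digit, bitmask of digits used) to path counts, advanced one step per remaining move and summed at the end, so equal states are merged instead of re-explored.
import Mathlib
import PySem

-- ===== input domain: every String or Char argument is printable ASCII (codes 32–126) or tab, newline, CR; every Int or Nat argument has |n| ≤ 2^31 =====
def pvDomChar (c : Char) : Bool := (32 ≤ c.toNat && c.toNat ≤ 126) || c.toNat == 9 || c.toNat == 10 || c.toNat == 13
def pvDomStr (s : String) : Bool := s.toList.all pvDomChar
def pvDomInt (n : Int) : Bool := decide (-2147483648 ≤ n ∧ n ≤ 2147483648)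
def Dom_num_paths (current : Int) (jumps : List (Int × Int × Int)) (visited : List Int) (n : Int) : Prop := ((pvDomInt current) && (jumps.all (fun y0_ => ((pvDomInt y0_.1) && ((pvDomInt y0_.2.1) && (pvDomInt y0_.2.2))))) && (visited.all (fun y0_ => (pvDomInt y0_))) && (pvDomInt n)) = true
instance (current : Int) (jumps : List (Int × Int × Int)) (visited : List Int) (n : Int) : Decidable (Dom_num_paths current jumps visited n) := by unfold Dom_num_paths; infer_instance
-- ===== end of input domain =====

-- B replaces A's recursive backtracking over individual paths by a bitmask dynamic programming:
-- it advances a layer dict mapping (last digit, bitmask of digits used) to path counts, one step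
-- per remaining move, and sums the final layer — merging states instead of enumerating paths.
-- Python A mutates its `visited` set argument during the call (add/remove, restored before
-- returning) while B never touches it; the equivalence proved here is about the RETURN value only.

-- ===== PORT A =====
-- jumps[(a, b)] lookup in the dict ported as an association list of triples (first match)
def pvLookup (jumps : List (Int × Int × Int)) (a b : Int) : Option Int :=
  (jumps.find? (fun t => t.1 == a && t.2.1 == b)).map (fun t => t.2.2)

-- '(cur, d) not in jumps or jumps[(cur, d)] in vis' (short-circuit: the lookup only happens when the key is present)
def pvAllowed (jumps : List (Int × Int × Int)) (cur d : Int) (vis : List Int) : Bool :=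
  match pvLookup jumps cur d with
  | none => true
  | some x => PySem.Set.contains vis x

-- number of digits 1..9 not yet in vis (termination measure for port A)
def pvFreeC (vis : List Int) : Nat :=
  (([1, 2, 3, 4, 5, 6, 7, 8, 9] : List Int).filter (fun d => !(PySem.Set.contains vis d))).length

theorem pvFilter_and_ne_lt (L : List Int) (p : Int → Bool) (k : Int) (hk : k ∈ L) (hpk : p k = true) :
    (L.filter (fun x => p x && !(x == k))).length < (L.filter p).length := by
  induction L with
  | nil => cases hk
  | cons a t ih =>
    by_cases hak : a = k
    · subst hak
      have hle : (t.filter (fun x => p x && !(x == a))).length ≤ (t.filter p).length := by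
        rw [← List.countP_eq_length_filter, ← List.countP_eq_length_filter]
        exact List.countP_mono_left (fun x _ hx => by
          have := (by simpa using hx : p x = true ∧ ¬ x = a)
          simpa using this.1)
      simp [hpk]
      omega
    · have hk' : k ∈ t := by
        rcases List.mem_cons.1 hk with h | h
        · exact absurd h.symm hak
        · exact h
      have hne : (a == k) = false := by simp [hak]
      by_cases hpa : p a = true
      · simp [hpa, hne]
        exact ih hk'
      · simp [Bool.eq_false_iff.2 hpa, hne] at *
        exact ih hk'

theorem pvDigitsMem (d : Int) (hd1 : 1 ≤ d) (hd2 : d < 10) :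
    d ∈ ([1, 2, 3, 4, 5, 6, 7, 8, 9] : List Int) := by
  have : d = 1 ∨ d = 2 ∨ d = 3 ∨ d = 4 ∨ d = 5 ∨ d = 6 ∨ d = 7 ∨ d = 8 ∨ d = 9 := by omega
  rcases this with h|h|h|h|h|h|h|h|h <;> subst h <;> simp

theorem pvFreeC_add_lt (vis : List Int) (d : Int) (hd1 : 1 ≤ d) (hd2 : d < 10)
    (h : d ∉ vis) : pvFreeC (PySem.Set.add vis d) < pvFreeC vis := by
  unfold pvFreeC
  rw [PySem.Set.add_of_not_mem h]
  have hfe : (([1, 2, 3, 4, 5, 6, 7, 8, 9] : List Int).filter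
      (fun x => !(PySem.Set.contains (vis ++ [d]) x)))
      = (([1, 2, 3, 4, 5, 6, 7, 8, 9] : List Int).filter
      (fun x => (!(PySem.Set.contains vis x)) && !(x == d))) := by
    apply List.filter_congr
    intro x _
    by_cases hxd : x = d <;> simp [PySem.Set.contains, hxd]
  rw [hfe]
  apply pvFilter_and_ne_lt _ _ _ (pvDigitsMem d hd1 hd2)
  simp [PySem.Set.contains, h]

def num_paths (current : Int) (jumps : List (Int × Int × Int)) (visited : List Int) (n : Int) : Int :=
  if n - 1 = 0 then 1
  else
    -- '.attach' only carries the proof 'next_number ∈ range(1, 10)' for termination; the fold is unchanged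
    (PySem.List.pyRange 1 10 1).attach.foldl (fun paths x =>
      if _h1 : x.1 ∈ visited then paths
      else
        if pvAllowed jumps current x.1 visited then
          paths + num_paths x.1 jumps (PySem.Set.add visited x.1) (n - 1)
        else paths) 0
termination_by pvFreeC visited
decreasing_by
  have hb := (PySem.List.mem_pyRange_one).1 x.2
  exact pvFreeC_add_lt visited x.1 hb.1 hb.2 _h1

-- ===== PORT B =====
-- jumps.get((cur, d)) on the association list, by structural recursion (first match)
def bJump : List (Int × Int × Int) → Int → Int → Option Int
  | [], _, _ => none
  | (a, b, t) :: rest, cur, d => if a == cur && b == d then some t else bJump rest cur d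

-- body of Source B's inner 'for d in range(1, 10)' loop for one layer entry ((cur, mask), c)
def bPush (jumps : List (Int × Int × Int)) (visited : List Int) (cur : Int) (mask : Nat) (c : Int)
    (nxt : PySem.Dict (Int × Nat) Int) (d : Int) : PySem.Dict (Int × Nat) Int :=
  if visited.contains d || Nat.testBit mask d.toNat then nxt
  else if (match bJump jumps cur d with
           | none => true
           | some t => visited.contains t ||
               (decide (1 ≤ t) && decide (t ≤ 9) && Nat.testBit mask t.toNat)) then
    nxt.insert (d, mask ||| 1 <<< d.toNat) (nxt.getD (d, mask ||| 1 <<< d.toNat) 0 + c)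
  else nxt

-- one step of the layer DP (masks are nonnegative Python ints, carried as Nat; '>>'/'|'/'<<' are exact there)
def bStep (jumps : List (Int × Int × Int)) (visited : List Int)
    (layer : PySem.Dict (Int × Nat) Int) : PySem.Dict (Int × Nat) Int :=
  layer.items.foldl (fun nxt p =>
    (PySem.List.pyRange 1 10 1).foldl (bPush jumps visited p.1.1 p.1.2 p.2) nxt)
    PySem.Dict.empty

-- 'for _ in range(n - 1): if not layer: break; layer = step(layer)'
def bRun (jumps : List (Int × Int × Int)) (visited : List Int) :
    Nat → PySem.Dict (Int × Nat) Int → PySem.Dict (Int × Nat) Int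
  | 0, layer => layer
  | k + 1, layer =>
    if layer.items.isEmpty then layer
    else bRun jumps visited k (bStep jumps visited layer)

def num_paths_alt (current : Int) (jumps : List (Int × Int × Int)) (visited : List Int) (n : Int) : Int :=
  if n ≤ 0 then 0
  else (bRun jumps visited (n - 1).toNat
      (PySem.Dict.ofList [((current, (0 : Nat)), (1 : Int))])).values.sum

-- ===== PRECONDITION & SPEC =====
def Spec_num_paths (current : Int) (jumps : List (Int × Int × Int)) (visited : List Int) (n : Int) (out : Int) : Prop := out = num_paths_alt current jumps visited n
instance (current : Int) (jumps : List (Int × Int × Int)) (visited : List Int) (n : Int) (out : Int) : Decidable (Spec_num_paths current jumps visited n out) := by unfold Spec_num_paths; infer_instance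

-- ===== CLAIM (what is proved, stated in full; the proofs are below) =====
def Claim_equal_num_paths : Prop := ∀ (current : Int) (jumps : List (Int × Int × Int)) (visited : List Int) (n : Int), Dom_num_paths current jumps visited n → Spec_num_paths current jumps visited n (num_paths current jumps visited n)

-- ===== LEMMAS AND PROOFS =====

theorem pvFoldl_if_add (L : List Int) (c : Int → Bool) (g : Int → Int) (init : Int) :
    L.foldl (fun p d => if c d then p + g d else p) init
      = init + ((L.filter c).map g).sum := by
  induction L generalizing init with
  | nil => simp
  | cons a t ih =>
    by_cases ha : c a = true <;>
      simp [ha, ih, Int.add_assoc]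

-- A's recursion written as a sum over the accepted next digits
theorem pvUnfoldA (cur : Int) (jumps : List (Int × Int × Int)) (vis : List Int) (n : Int) (h : ¬ n - 1 = 0) :
    num_paths cur jumps vis n
      = (((PySem.List.pyRange 1 10 1).filter
            (fun d => !(decide (d ∈ vis)) && pvAllowed jumps cur d vis)).map
          (fun d => num_paths d jumps (PySem.Set.add vis d) (n - 1))).sum := by
  rw [num_paths]
  rw [if_neg h]
  have hbody : ((PySem.List.pyRange 1 10 1).attach.foldl (fun paths x =>
      if _h1 : x.1 ∈ vis then paths
      else
        if pvAllowed jumps cur x.1 vis then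
          paths + num_paths x.1 jumps (PySem.Set.add vis x.1) (n - 1)
        else paths) 0)
      = ((PySem.List.pyRange 1 10 1).attach.foldl (fun paths x =>
      if (!(decide (x.1 ∈ vis)) && pvAllowed jumps cur x.1 vis) then
        paths + num_paths x.1 jumps (PySem.Set.add vis x.1) (n - 1)
      else paths) 0) := by
    congr 1
    funext paths x
    by_cases h1 : x.1 ∈ vis
    · simp [h1]
    · by_cases h2 : pvAllowed jumps cur x.1 vis = true <;> simp [h1, h2]
  rw [hbody, List.foldl_attach (f := fun paths d =>
      if (!(decide (d ∈ vis)) && pvAllowed jumps cur d vis) then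
        paths + num_paths d jumps (PySem.Set.add vis d) (n - 1)
      else paths), pvFoldl_if_add, Int.zero_add]

-- the digits recorded in a bitmask, as a list of Ints
def maskSet (mask : Nat) : List Int :=
  ([1, 2, 3, 4, 5, 6, 7, 8, 9] : List Int).filter (fun d => Nat.testBit mask d.toNat)

theorem pvMem_digits (x : Int) : x ∈ ([1, 2, 3, 4, 5, 6, 7, 8, 9] : List Int) ↔ 1 ≤ x ∧ x < 10 := by
  constructor
  · intro h; simp at h; omega
  · intro h; exact pvDigitsMem x h.1 h.2

theorem pvMem_maskSet (mask : Nat) (x : Int) :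
    x ∈ maskSet mask ↔ (1 ≤ x ∧ x < 10) ∧ Nat.testBit mask x.toNat = true := by
  unfold maskSet
  rw [List.mem_filter, pvMem_digits]

theorem pvMaskSet_zero : maskSet 0 = [] := by decide

-- A's value on n ≤ 0 is 0 (the base case n - 1 == 0 is never reached and the digits run out)
theorem pvA_zero (jumps : List (Int × Int × Int)) :
    ∀ (k : Nat) (c : Int) (vis : List Int) (n : Int), pvFreeC vis = k → n ≤ 0 →
      num_paths c jumps vis n = 0 := by
  intro k
  induction k using Nat.strong_induction_on with
  | _ k ih =>
    intro c vis n hk hn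
    rw [pvUnfoldA c jumps vis n (by omega)]
    apply List.sum_eq_zero
    intro x hx
    obtain ⟨d, hd, rfl⟩ := List.mem_map.1 hx
    have hmem := List.mem_filter.1 hd
    have hb := (PySem.List.mem_pyRange_one).1 hmem.1
    have hnv : d ∉ vis := by
      have := hmem.2; simp only [Bool.and_eq_true, Bool.not_eq_true', decide_eq_false_iff_not] at this
      exact this.1
    exact ih _ (hk ▸ pvFreeC_add_lt vis d hb.1 hb.2 hnv) d _ (n - 1) rfl (by omega)

-- num_paths depends on `visited` only through membership
theorem pvA_ext (jumps : List (Int × Int × Int)) :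
    ∀ (k : Nat) (c : Int) (v1 v2 : List Int) (n : Int), pvFreeC v1 = k →
      (∀ x, x ∈ v1 ↔ x ∈ v2) → num_paths c jumps v1 n = num_paths c jumps v2 n := by
  intro k
  induction k using Nat.strong_induction_on with
  | _ k ih =>
    intro c v1 v2 n hk hmem
    by_cases hn : n - 1 = 0
    · rw [num_paths, num_paths, if_pos hn, if_pos hn]
    · rw [pvUnfoldA c jumps v1 n hn, pvUnfoldA c jumps v2 n hn]
      have hfe : ((PySem.List.pyRange 1 10 1).filter
            (fun d => !(decide (d ∈ v1)) && pvAllowed jumps c d v1))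
          = ((PySem.List.pyRange 1 10 1).filter
            (fun d => !(decide (d ∈ v2)) && pvAllowed jumps c d v2)) := by
        apply List.filter_congr
        intro d _
        have h1 : decide (d ∈ v1) = decide (d ∈ v2) := by
          simp [hmem d]
        have h2 : pvAllowed jumps c d v1 = pvAllowed jumps c d v2 := by
          unfold pvAllowed
          cases pvLookup jumps c d with
          | none => rfl
          | some t => simp [PySem.Set.contains, hmem t]
        rw [h1, h2]
      rw [hfe]
      apply congrArg
      apply List.map_congr_left
      intro d hd
      have hmf := List.mem_filter.1 hd
      have hb := (PySem.List.mem_pyRange_one).1 hmf.1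
      have hnv2 : d ∉ v2 := by
        have := hmf.2; simp only [Bool.and_eq_true, Bool.not_eq_true', decide_eq_false_iff_not] at this
        exact this.1
      have hnv1 : d ∉ v1 := fun h => hnv2 ((hmem d).1 h)
      apply ih _ (hk ▸ pvFreeC_add_lt v1 d hb.1 hb.2 hnv1) d _ _ (n - 1) rfl
      intro x
      rw [PySem.Set.add_of_not_mem hnv1, PySem.Set.add_of_not_mem hnv2]
      simp [List.mem_append, hmem x]

-- B's hand-written lookup computes the same first match as A's find?-based one
theorem pvBJump_eq (jumps : List (Int × Int × Int)) (cur d : Int) :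
    bJump jumps cur d = pvLookup jumps cur d := by
  induction jumps with
  | nil => rfl
  | cons p rest ih =>
    obtain ⟨a, b, t⟩ := p
    rcases h : (a == cur && b == d) with _ | _
    · simpa [bJump, pvLookup, List.find?, h] using ih
    · simp [bJump, pvLookup, List.find?, h]

-- the weighted A-value of a layer: each entry counts c paths that continue like A from
-- (last digit, visited ∪ mask digits) with m moves left
def pvSL (jumps : List (Int × Int × Int)) (visited : List Int) (m : Int)
    (dct : PySem.Dict (Int × Nat) Int) : Int :=
  (dct.items.map (fun q => q.2 * num_paths q.1.1 jumps (visited ++ maskSet q.1.2) m)).sum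

theorem pvReplace_id (l : List ((Int × Nat) × Int)) (k : Int × Nat) (w : Int)
    (h : k ∉ l.map Prod.fst) :
    l.map (fun p => if p.1 == k then (k, w) else p) = l := by
  rw [List.map_eq_iff]
  intro i
  cases hi : l[i]? with
  | none => simp
  | some p =>
    have hp : p ∈ l := List.mem_of_getElem? hi
    have : ¬ p.1 = k := fun he => h (he ▸ List.mem_map_of_mem hp)
    simp [this]

theorem pvReplace_sum (g : Int × Nat → Int) :
    ∀ (l : List ((Int × Nat) × Int)) (k : Int × Nat) (v0 w : Int),
      (l.map Prod.fst).Nodup → (k, v0) ∈ l →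
      ((l.map (fun p => if p.1 == k then (k, w) else p)).map (fun q => q.2 * g q.1)).sum
        = (l.map (fun q => q.2 * g q.1)).sum - v0 * g k + w * g k := by
  intro l
  induction l with
  | nil => intro k v0 w _ h; cases h
  | cons p rest ih =>
    intro k v0 w hnd hmem
    have hnd' := hnd
    rw [List.map_cons, List.nodup_cons] at hnd'
    by_cases hpk : p.1 = k
    · have hrest : k ∉ rest.map Prod.fst := hpk ▸ hnd'.1
      have hv0 : v0 = p.2 := by
        rcases List.mem_cons.1 hmem with h | h
        · exact congrArg Prod.snd h
        · exact absurd (List.mem_map_of_mem (f := Prod.fst) h) hrest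
      have hfp : (if (p.1 == k) = true then (k, w) else p) = (k, w) := by simp [hpk]
      rw [List.map_cons, hfp, pvReplace_id rest k w hrest, List.map_cons, List.sum_cons,
        List.map_cons, List.sum_cons, hv0, hpk]
      ring
    · have hmem' : (k, v0) ∈ rest := by
        rcases List.mem_cons.1 hmem with h | h
        · exact absurd (congrArg Prod.fst h).symm hpk
        · exact h
      have hthis := ih k v0 w hnd'.2 hmem'
      have hfp : (if (p.1 == k) = true then (k, w) else p) = p := by simp [hpk]
      rw [List.map_cons, hfp, List.map_cons, List.sum_cons, List.map_cons, List.sum_cons, hthis]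
      ring

-- adding c at key k raises the weighted sum by c * g k (keys unique)
theorem pvSL_insert (g : Int × Nat → Int) (dct : PySem.Dict (Int × Nat) Int)
    (k : Int × Nat) (c : Int) (h : dct.keys.Nodup) :
    ((dct.insert k (dct.getD k 0 + c)).items.map (fun q => q.2 * g q.1)).sum
      = (dct.items.map (fun q => q.2 * g q.1)).sum + c * g k := by
  by_cases hc : dct.contains k = true
  · obtain ⟨v, hv⟩ : ∃ v, dct.get? k = some v := by
      have := PySem.Dict.contains_eq_isSome_get? (d := dct) (k := k)
      rw [hc] at this
      exact Option.isSome_iff_exists.1 this.symm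
    have hgd : dct.getD k 0 = v := PySem.Dict.getD_of_get?_eq_some dct 0 hv
    have hmem : (k, v) ∈ dct.items := PySem.Dict.mem_items_of_get?_eq_some dct hv
    rw [hgd, PySem.Dict.items_insert_of_contains dct (v + c) hc]
    rw [pvReplace_sum g dct.items k v (v + c) h hmem]
    ring
  · rw [PySem.Dict.getD_of_not_contains dct 0 (by simpa using hc),
      PySem.Dict.items_insert_of_not_contains dct _ (by simpa using hc)]
    simp [List.sum_append]

theorem pvPush_nodup (jumps : List (Int × Int × Int)) (visited : List Int) (cur : Int)
    (mask : Nat) (c : Int) (nxt : PySem.Dict (Int × Nat) Int) (d : Int)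
    (h : nxt.keys.Nodup) : (bPush jumps visited cur mask c nxt d).keys.Nodup := by
  unfold bPush
  split_ifs <;> first | exact h | exact PySem.Dict.nodup_keys_insert nxt _ _ h

theorem pvFold_push_nodup (jumps : List (Int × Int × Int)) (visited : List Int) (cur : Int)
    (mask : Nat) (c : Int) :
    ∀ (L : List Int) (nxt : PySem.Dict (Int × Nat) Int), nxt.keys.Nodup →
      (L.foldl (bPush jumps visited cur mask c) nxt).keys.Nodup := by
  intro L
  induction L with
  | nil => intro nxt h; exact h
  | cons a t ih =>
    intro nxt h
    exact ih _ (pvPush_nodup jumps visited cur mask c nxt a h)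

-- one bPush adds c * (A's value of the pushed state) exactly when A's acceptance condition holds
theorem pvPush_sum (jumps : List (Int × Int × Int)) (visited : List Int) (cur : Int)
    (mask : Nat) (c : Int) (m : Int) (nxt : PySem.Dict (Int × Nat) Int) (d : Int)
    (hd : 1 ≤ d ∧ d < 10) (h : nxt.keys.Nodup) :
    pvSL jumps visited m (bPush jumps visited cur mask c nxt d)
      = pvSL jumps visited m nxt +
        (if (!(decide (d ∈ visited ++ maskSet mask)) &&
              pvAllowed jumps cur d (visited ++ maskSet mask)) then
          c * num_paths d jumps (visited ++ maskSet (mask ||| 1 <<< d.toNat)) m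
        else 0) := by
  have hguard : (visited.contains d || Nat.testBit mask d.toNat)
      = decide (d ∈ visited ++ maskSet mask) := by
    rw [Bool.eq_iff_iff]
    simp [List.mem_append, pvMem_maskSet, hd]
  have hok : (match bJump jumps cur d with
           | none => true
           | some t => visited.contains t ||
               (decide (1 ≤ t) && decide (t ≤ 9) && Nat.testBit mask t.toNat))
      = pvAllowed jumps cur d (visited ++ maskSet mask) := by
    rw [pvBJump_eq]
    unfold pvAllowed
    cases pvLookup jumps cur d with
    | none => rfl
    | some t =>
      rw [Bool.eq_iff_iff]
      simp [PySem.Set.contains, List.mem_append, pvMem_maskSet]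
      constructor
      · rintro (h1 | ⟨⟨ha, hb⟩, hc⟩)
        · exact Or.inl h1
        · exact Or.inr ⟨⟨ha, by omega⟩, hc⟩
      · rintro (h1 | ⟨⟨ha, hb⟩, hc⟩)
        · exact Or.inl h1
        · exact Or.inr ⟨⟨ha, by omega⟩, hc⟩
  unfold bPush
  rw [hguard, hok]
  by_cases h1 : d ∈ visited ++ maskSet mask
  · simp [h1]
  · by_cases h2 : pvAllowed jumps cur d (visited ++ maskSet mask) = true
    · simp only [h1, decide_false, if_false, h2, if_true, Bool.not_false, Bool.true_and,
        Bool.false_eq_true]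
      unfold pvSL
      rw [pvSL_insert (fun q => num_paths q.1 jumps (visited ++ maskSet q.2) m) nxt _ c h]
    · simp [h1, h2]

-- the inner loop over all digits contributes c * Σ over accepted digits
theorem pvInner_sum (jumps : List (Int × Int × Int)) (visited : List Int) (cur : Int)
    (mask : Nat) (c : Int) (m : Int) :
    ∀ (L : List Int), (∀ d ∈ L, 1 ≤ d ∧ d < 10) →
      ∀ (nxt : PySem.Dict (Int × Nat) Int), nxt.keys.Nodup →
      pvSL jumps visited m (L.foldl (bPush jumps visited cur mask c) nxt)
        = pvSL jumps visited m nxt +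
          c * ((L.filter (fun d => !(decide (d ∈ visited ++ maskSet mask)) &&
                  pvAllowed jumps cur d (visited ++ maskSet mask))).map
              (fun d => num_paths d jumps (visited ++ maskSet (mask ||| 1 <<< d.toNat)) m)).sum := by
  intro L
  induction L with
  | nil => intro _ nxt _; simp
  | cons a t ih =>
    intro hL nxt hnd
    have ha := hL a (List.mem_cons_self)
    rw [List.foldl_cons,
      ih (fun d hd => hL d (List.mem_cons_of_mem a hd)) _
        (pvPush_nodup jumps visited cur mask c nxt a hnd),
      pvPush_sum jumps visited cur mask c m nxt a ha hnd]
    by_cases hcond : (!(decide (a ∈ visited ++ maskSet mask)) &&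
        pvAllowed jumps cur a (visited ++ maskSet mask)) = true
    · simp only [List.filter_cons, hcond, if_true, List.map_cons, List.sum_cons]
      ring
    · simp only [List.filter_cons, hcond, if_false, Bool.false_eq_true]
      ring

-- after its bitmask grows by d, the B-state's visited set has the same members as A's Set.add
theorem pvMask_add (visited : List Int) (mask : Nat) (d : Int) (hd : 1 ≤ d ∧ d < 10)
    (hnm : d ∉ visited ++ maskSet mask) (x : Int) :
    x ∈ visited ++ maskSet (mask ||| 1 <<< d.toNat)
      ↔ x ∈ PySem.Set.add (visited ++ maskSet mask) d := by
  rw [PySem.Set.add_of_not_mem hnm]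
  have hbit : ∀ y : Int, (1 ≤ y ∧ y < 10) →
      (Nat.testBit (mask ||| 1 <<< d.toNat) y.toNat = true
        ↔ (Nat.testBit mask y.toNat = true ∨ y = d)) := by
    intro y hy
    rw [Nat.testBit_or, Nat.shiftLeft_eq, one_mul, Nat.testBit_two_pow]
    have : (d.toNat = y.toNat) ↔ y = d := by omega
    simp [this]
  simp only [List.mem_append, pvMem_maskSet, List.mem_singleton]
  constructor
  · rintro (h | ⟨hy, hb⟩)
    · exact Or.inl (Or.inl h)
    · rcases (hbit x hy).1 hb with h | h
      · exact Or.inl (Or.inr ⟨hy, h⟩)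
      · exact Or.inr h
  · rintro ((h | ⟨hy, hb⟩) | h)
    · exact Or.inl h
    · exact Or.inr ⟨hy, (hbit x hy).2 (Or.inl hb)⟩
    · exact Or.inr ⟨h ▸ hd, (hbit x (h ▸ hd)).2 (Or.inr h)⟩

-- processing one layer entry adds exactly c * (A's value of that state with m moves left)
theorem pvItem_sum (jumps : List (Int × Int × Int)) (visited : List Int) (m : Int)
    (hm : ¬ m - 1 = 0) (cur : Int) (mask : Nat) (c : Int)
    (nxt : PySem.Dict (Int × Nat) Int) (h : nxt.keys.Nodup) :
    pvSL jumps visited (m - 1)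
        ((PySem.List.pyRange 1 10 1).foldl (bPush jumps visited cur mask c) nxt)
      = pvSL jumps visited (m - 1) nxt +
        c * num_paths cur jumps (visited ++ maskSet mask) m := by
  rw [pvInner_sum jumps visited cur mask c (m - 1) _
      (fun d hd => (PySem.List.mem_pyRange_one).1 hd) nxt h]
  rw [pvUnfoldA cur jumps (visited ++ maskSet mask) m hm]
  congr 2
  refine congrArg List.sum (List.map_congr_left ?_)
  intro d hd
  have hmf := List.mem_filter.1 hd
  have hb := (PySem.List.mem_pyRange_one).1 hmf.1
  have hnm : d ∉ visited ++ maskSet mask := by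
    have := hmf.2; simp only [Bool.and_eq_true, Bool.not_eq_true', decide_eq_false_iff_not] at this
    exact this.1
  exact pvA_ext jumps (pvFreeC (visited ++ maskSet (mask ||| 1 <<< d.toNat))) d _ _ (m - 1) rfl
    (pvMask_add visited mask d hb hnm)

-- one DP step preserves the weighted A-value of the layer
theorem pvStep_sum (jumps : List (Int × Int × Int)) (visited : List Int) (m : Int)
    (hm : ¬ m - 1 = 0) (layer : PySem.Dict (Int × Nat) Int) :
    pvSL jumps visited (m - 1) (bStep jumps visited layer)
      = pvSL jumps visited m layer := by
  unfold bStep pvSL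
  have main : ∀ (ps : List ((Int × Nat) × Int)) (nxt : PySem.Dict (Int × Nat) Int),
      nxt.keys.Nodup →
      pvSL jumps visited (m - 1) (ps.foldl (fun nxt p =>
          (PySem.List.pyRange 1 10 1).foldl (bPush jumps visited p.1.1 p.1.2 p.2) nxt) nxt)
        = pvSL jumps visited (m - 1) nxt +
          (ps.map (fun q => q.2 * num_paths q.1.1 jumps (visited ++ maskSet q.1.2) m)).sum := by
    intro ps
    induction ps with
    | nil => intro nxt _; simp
    | cons p t ih =>
      intro nxt hnd
      rw [List.foldl_cons,
        ih _ (pvFold_push_nodup jumps visited p.1.1 p.1.2 p.2 _ nxt hnd),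
        pvItem_sum jumps visited m hm p.1.1 p.1.2 p.2 nxt hnd]
      simp only [List.map_cons, List.sum_cons]
      ring
  have := main layer.items PySem.Dict.empty (by simp [PySem.Dict.keys_empty])
  unfold pvSL at this
  simpa [PySem.Dict.empty] using this

-- running K steps from any layer and summing equals the layer's weighted A-value at K+1 moves
theorem pvRun_sum (jumps : List (Int × Int × Int)) (visited : List Int) :
    ∀ (K : Nat) (layer : PySem.Dict (Int × Nat) Int),
      (bRun jumps visited K layer).values.sum = pvSL jumps visited ((K : Int) + 1) layer := by
  intro K
  induction K with
  | zero =>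
    intro layer
    unfold bRun pvSL
    have : layer.items.map (fun q =>
        q.2 * num_paths q.1.1 jumps (visited ++ maskSet q.1.2) (((0 : Nat) : Int) + 1))
        = layer.items.map (fun q => q.2) := by
      apply List.map_congr_left
      intro q _
      rw [num_paths, if_pos (by norm_num), mul_one]
    rw [this]
    rfl
  | succ k ih =>
    intro layer
    by_cases hemp : layer.items.isEmpty = true
    · show (if layer.items.isEmpty then layer
          else bRun jumps visited k (bStep jumps visited layer)).values.sum = _
      rw [if_pos hemp]
      unfold pvSL
      rw [List.isEmpty_iff.1 hemp]
      show (layer.items.map (fun q => q.2)).sum = _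
      rw [List.isEmpty_iff.1 hemp]
      rfl
    · show (if layer.items.isEmpty then layer
          else bRun jumps visited k (bStep jumps visited layer)).values.sum = _
      rw [if_neg (by simpa using hemp)]
      rw [ih (bStep jumps visited layer)]
      have := pvStep_sum jumps visited ((k : Int) + 1 + 1) (by omega) layer
      simp only [add_sub_cancel_right] at this
      rw [this]
      have hc2 : ((k : Int) + 1 + 1) = (((k + 1 : Nat) : Int) + 1) := by push_cast; ring
      rw [hc2]

-- ===== VERDICT (by name: the statement is the Claim_ definition above) =====
theorem num_paths_spec : Claim_equal_num_paths := by
  intro current jumps visited n _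
  unfold Spec_num_paths num_paths_alt
  by_cases hn : n ≤ 0
  · rw [if_pos hn]
    exact pvA_zero jumps (pvFreeC visited) current visited n rfl hn
  · rw [if_neg hn]
    rw [pvRun_sum jumps visited (n - 1).toNat _]
    have hcast : ((n - 1).toNat : Int) + 1 = n := by omega
    rw [hcast]
    unfold pvSL
    have hitems : (PySem.Dict.ofList [((current, (0 : Nat)), (1 : Int))]).items
        = [((current, (0 : Nat)), (1 : Int))] := by
      simp [PySem.Dict.ofList, PySem.Dict.update, PySem.Dict.insert, PySem.Dict.empty,
        PySem.Dict.contains]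
    rw [hitems]
    simp [pvMaskSet_zero]
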